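-- pv_equiv track=rewrite | github.com/iarslankhalid/AI-Assistant-backend | app/api/email/sync.py | calculate_thread_counts
-- ===== SOURCE A (Python) =====
-- from typing import Optional, List, Dict
-- from collections import defaultdict
--
-- def calculate_thread_counts(ms_emails: List[dict]) -> tuple[Dict[str, int], Dict[str, int]]:
--     total_counts = defaultdict(int)
--     unread_counts = defaultdict(int)
--
--     for email in ms_emails:
--         cid = email["conversationId"]
--         total_counts[cid] += 1
--         if not email.get("isRead", False):
--             unread_counts[cid] += 1
--
--     return total_counts, unread_counts
-- ===== SOURCE B (Python) =====
-- from collections import defaultdict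
--
-- def calculate_thread_counts(ms_emails):
--     # Partition first, summarise per group afterwards (group-then-measure,
--     # instead of A's streaming counter increments).
--     groups = defaultdict(list)
--     for email in ms_emails:
--         groups[email["conversationId"]].append(email)
--     unread_groups = defaultdict(list)
--     for email in ms_emails:
--         if not email.get("isRead", False):
--             unread_groups[email["conversationId"]].append(email)
--     return (defaultdict(int, {cid: len(g) for cid, g in groups.items()}),
--             defaultdict(int, {cid: len(g) for cid, g in unread_groups.items()}))
-- ===== Notes on version B (the rewrite author's own statement) =====
-- stated objective: alternative
-- what changed: B partitions the emails into per-conversation groups (and a second grouping of only the unread emails) and then reads each count off as the length of its group, instead of A's single streaming pass that increments two counter dicts per email.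
import Mathlib
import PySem

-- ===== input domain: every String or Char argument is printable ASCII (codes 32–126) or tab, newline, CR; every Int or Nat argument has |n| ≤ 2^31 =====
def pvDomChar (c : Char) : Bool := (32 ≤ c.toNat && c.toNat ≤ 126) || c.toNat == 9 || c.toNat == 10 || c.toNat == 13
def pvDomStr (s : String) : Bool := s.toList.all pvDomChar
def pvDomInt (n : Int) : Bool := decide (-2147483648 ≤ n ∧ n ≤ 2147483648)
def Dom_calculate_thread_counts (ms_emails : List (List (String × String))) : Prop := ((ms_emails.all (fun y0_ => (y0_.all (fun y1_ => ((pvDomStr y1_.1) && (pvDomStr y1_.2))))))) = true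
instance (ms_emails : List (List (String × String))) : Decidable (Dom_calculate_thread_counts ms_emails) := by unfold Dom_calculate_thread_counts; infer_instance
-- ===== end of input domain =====

-- B groups the emails per conversation (plus a second grouping of only the unread emails) and reads
-- each count off as its group's length, instead of A's streaming per-email counter increments (objective: alternative).


-- ===== PORT A =====
-- email["conversationId"] (a missing key = KeyError is excluded by Pre_, so the "" default is never reached there)
def pvCid (email : List (String × String)) : String :=
  (List.lookup "conversationId" email).getD ""

-- not email.get("isRead", False): true iff the key is absent or its (string) value is falsy (empty)
def pvUnread (email : List (String × String)) : Bool :=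
  match List.lookup "isRead" email with
  | none => true
  | some s => s == ""

def calculate_thread_counts (ms_emails : List (List (String × String))) : (List (String × Int)) × (List (String × Int)) :=
  let st := ms_emails.foldl
    (fun (st : PySem.Dict String Int × PySem.Dict String Int) email =>
      (st.1.modify (pvCid email) 0 (· + 1),
       if pvUnread email then st.2.modify (pvCid email) 0 (· + 1) else st.2))
    (PySem.Dict.empty, PySem.Dict.empty)
  (st.1.items, st.2.items)

-- ===== PORT B =====
def calculate_thread_counts_alt (ms_emails : List (List (String × String))) : (List (String × Int)) × (List (String × Int)) :=
  let groups := ms_emails.foldl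
    (fun (d : PySem.Dict String (List (List (String × String)))) email =>
      d.modify (pvCid email) [] (· ++ [email])) PySem.Dict.empty
  let unread_groups := (ms_emails.filter (fun email => pvUnread email)).foldl
    (fun (d : PySem.Dict String (List (List (String × String)))) email =>
      d.modify (pvCid email) [] (· ++ [email])) PySem.Dict.empty
  (groups.items.map (fun p => (p.1, PySem.List.len p.2)),
   unread_groups.items.map (fun p => (p.1, PySem.List.len p.2)))

-- ===== PRECONDITION & SPEC =====
-- Pre_ excludes exactly the inputs containing an email without a "conversationId" key, where Python A raises KeyError.
def Pre_calculate_thread_counts (ms_emails : List (List (String × String))) : Prop :=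
  ∀ email ∈ ms_emails, (List.lookup "conversationId" email).isSome = true
instance (ms_emails : List (List (String × String))) : Decidable (Pre_calculate_thread_counts ms_emails) := by unfold Pre_calculate_thread_counts; infer_instance
def pvWitness_calculate_thread_counts : (List (List (String × String))) :=
  [[("conversationId", "c1")], [("conversationId", "c1"), ("isRead", "true")], [("conversationId", "c2"), ("isRead", "")]]

def Spec_calculate_thread_counts (ms_emails : List (List (String × String))) (out : (List (String × Int)) × (List (String × Int))) : Prop := out = calculate_thread_counts_alt ms_emails
instance (ms_emails : List (List (String × String))) (out : (List (String × Int)) × (List (String × Int))) : Decidable (Spec_calculate_thread_counts ms_emails out) := by unfold Spec_calculate_thread_counts; infer_instance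

-- ===== CLAIM (what is proved, stated in full; the proofs are below) =====
def Claim_equal_calculate_thread_counts : Prop := ∀ (ms_emails : List (List (String × String))), Dom_calculate_thread_counts ms_emails → Pre_calculate_thread_counts ms_emails → Spec_calculate_thread_counts ms_emails (calculate_thread_counts ms_emails)

-- ===== LEMMAS AND PROOFS =====
-- Core fact: a counting fold's items are the grouping fold's items with each group replaced by its length.
theorem pv_count_eq_group_len (l : List (List (String × String))) :
    (l.foldl (fun (d : PySem.Dict String Int) email => d.modify (pvCid email) 0 (· + 1)) PySem.Dict.empty).items
      = (l.foldl (fun (d : PySem.Dict String (List (List (String × String)))) email =>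
            d.modify (pvCid email) [] (· ++ [email])) PySem.Dict.empty).items.map
          (fun p => (p.1, PySem.List.len p.2)) := by
  rw [show (l.foldl (fun (d : PySem.Dict String Int) email => d.modify (pvCid email) 0 (· + 1)) PySem.Dict.empty)
      = ((l.map pvCid).foldl (fun d x => d.modify x 0 (· + 1)) PySem.Dict.empty) from by rw [List.foldl_map],
     show (l.foldl (fun (d : PySem.Dict String (List (List (String × String)))) email => d.modify (pvCid email) [] (· ++ [email])) PySem.Dict.empty)
      = ((l.map (fun e => (pvCid e, e))).foldl (fun (d : PySem.Dict String (List (List (String × String)))) (p : String × List (String × String)) => d.modify p.1 [] (· ++ [p.2])) PySem.Dict.empty) from by rw [List.foldl_map]]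
  have hnc : ((l.map pvCid).foldl (fun d x => d.modify x 0 (· + 1)) (PySem.Dict.empty : PySem.Dict String Int)).keys.Nodup := by
    exact PySem.Dict.nodup_keys_foldl_modify_key _ id 0 (fun _ _ v => v + 1) _ (by simp)
  have hng : ((l.map (fun e => (pvCid e, e))).foldl (fun (d : PySem.Dict String (List (List (String × String)))) p => d.modify p.1 [] (· ++ [p.2])) (PySem.Dict.empty : PySem.Dict String (List (List (String × String))))).keys.Nodup := by
    exact PySem.Dict.nodup_keys_foldl_modify_key _ (fun p : String × List (String × String) => p.1) [] (fun _ (p : String × List (String × String)) g => g ++ [p.2]) _ (by simp)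
  rw [PySem.Dict.items_eq_map_keys _ hnc 0, PySem.Dict.items_eq_map_keys _ hng [], List.map_map]
  have hkeys : ((l.map pvCid).foldl (fun d x => d.modify x 0 (· + 1)) (PySem.Dict.empty : PySem.Dict String Int)).keys
      = ((l.map (fun e => (pvCid e, e))).foldl (fun (d : PySem.Dict String (List (List (String × String)))) p => d.modify p.1 [] (· ++ [p.2])) (PySem.Dict.empty : PySem.Dict String (List (List (String × String))))).keys := by
    rw [PySem.Dict.keys_foldl_modify, PySem.Dict.keys_foldl_modify_key]
    simp [Function.comp_def]
  rw [hkeys]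
  apply List.map_congr_left
  intro k _
  simp only [PySem.Dict.getD_foldl_modify_add_one, PySem.Dict.getD_foldl_modify_append, PySem.Dict.getD_empty, PySem.List.len_eq]
  simp [List.count_eq_countP, List.filter_map, List.countP_eq_length_filter]
  congr 1

theorem calculate_thread_counts_eq (ms_emails : List (List (String × String))) :
    calculate_thread_counts ms_emails = calculate_thread_counts_alt ms_emails := by
  simp only [calculate_thread_counts, calculate_thread_counts_alt]
  rw [PySem.List.foldl_prod_mk
    (f := fun (d : PySem.Dict String Int) email => d.modify (pvCid email) 0 (· + 1))
    (g := fun (d : PySem.Dict String Int) email => if pvUnread email then d.modify (pvCid email) 0 (· + 1) else d)]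
  refine Prod.ext ?_ ?_
  · exact pv_count_eq_group_len ms_emails
  · rw [← List.foldl_filter]
    exact pv_count_eq_group_len (ms_emails.filter (fun email => pvUnread email))

-- ===== VERDICT (by name: the statement is the Claim_ definition above) =====
theorem calculate_thread_counts_spec : Claim_equal_calculate_thread_counts := by
  intro ms _ _
  unfold Spec_calculate_thread_counts
  exact calculate_thread_counts_eq ms
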